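-- pv_equiv track=rewrite | github.com/Shruthii02/leetcode | Minimum_Candy_Distribution.py | countCandies
-- ===== SOURCE A (Python) =====
-- def countCandies(ratings):
--     n = len(ratings)
--     candies = [1] * n
--     for i in range(1, n):
--         if ratings[i] > ratings[i-1]:
--             candies[i] = candies[i-1] + 1
--
--     for i in range(n-2, -1, -1):
--         if ratings[i] > ratings[i+1]:
--             candies[i] = max(candies[i], candies[i+1] + 1)
--     return sum(candies)
-- ===== SOURCE B (Python) =====
-- def _inc_left(ratings, i):
--     # length of the strictly increasing run ending at index i
--     k = 0
--     while i - k >= 1 and ratings[i - k - 1] < ratings[i - k]: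
--         k += 1
--     return k
--
-- def _dec_right(ratings, i):
--     # length of the strictly decreasing run starting at index i
--     k = 0
--     while i + k + 1 < len(ratings) and ratings[i + k] > ratings[i + k + 1]:
--         k += 1
--     return k
--
-- def countCandies(ratings):
--     # each child needs 1 + max(rise run ending here, fall run starting here)
--     return sum(1 + max(_inc_left(ratings, i), _dec_right(ratings, i))
--                for i in range(len(ratings)))
-- ===== Notes on version B (the rewrite author's own statement) =====
-- stated objective: alternative
-- what changed: B drops A's two mutating DP passes over a candies array and instead computes each child's candies directly as 1 + max(length of strictly increasing run ending at i, length of strictly decreasing run starting at i), summing over all indices.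
import Mathlib
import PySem

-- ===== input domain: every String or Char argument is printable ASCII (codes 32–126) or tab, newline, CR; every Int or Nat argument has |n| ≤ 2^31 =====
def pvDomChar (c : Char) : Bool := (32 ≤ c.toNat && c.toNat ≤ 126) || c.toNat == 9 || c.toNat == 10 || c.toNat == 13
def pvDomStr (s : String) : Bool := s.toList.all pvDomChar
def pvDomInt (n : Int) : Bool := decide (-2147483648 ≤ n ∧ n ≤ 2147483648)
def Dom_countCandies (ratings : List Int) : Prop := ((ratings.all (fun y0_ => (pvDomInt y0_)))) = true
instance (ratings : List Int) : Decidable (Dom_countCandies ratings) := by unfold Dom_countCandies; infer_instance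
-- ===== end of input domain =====

-- B replaces A's two mutating DP passes by a direct per-index formula (1 + max of the
-- increasing run ending here and the decreasing run starting here); objective: alternative.

-- ===== PORT A =====
-- forward-loop body: 'if ratings[i] > ratings[i-1]: candies[i] = candies[i-1] + 1'
def pvFwdStep (ratings : List Int) (c : List Int) (i : Int) : List Int :=
  if PySem.List.pyGetD ratings i 0 > PySem.List.pyGetD ratings (i - 1) 0 then
    PySem.List.pySetD c i (PySem.List.pyGetD c (i - 1) 0 + 1)
  else c

-- backward-loop body: 'if ratings[i] > ratings[i+1]: candies[i] = max(candies[i], candies[i+1] + 1)'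
def pvBwdStep (ratings : List Int) (c : List Int) (i : Int) : List Int :=
  if PySem.List.pyGetD ratings i 0 > PySem.List.pyGetD ratings (i + 1) 0 then
    PySem.List.pySetD c i (max (PySem.List.pyGetD c i 0) (PySem.List.pyGetD c (i + 1) 0 + 1))
  else c

def countCandies (ratings : List Int) : Int :=
  let n : Int := PySem.List.len ratings
  let candies : List Int := List.replicate ratings.length 1   -- [1] * n
  let candies := (PySem.List.pyRange 1 n 1).foldl (pvFwdStep ratings) candies
  let candies := (PySem.List.pyRange (n - 2) (-1) (-1)).foldl (pvBwdStep ratings) candies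
  candies.sum

-- ===== PORT B =====
-- while-loop of _inc_left: k counts the strictly increasing steps left of index i
def incLeftGo (ratings : List Int) (i k : Nat) : Nat :=
  if h : k + 1 ≤ i ∧
      PySem.List.pyGetD ratings ((i : Int) - (k : Int) - 1) 0
        < PySem.List.pyGetD ratings ((i : Int) - (k : Int)) 0 then
    incLeftGo ratings i (k + 1)
  else k
termination_by i - k
decreasing_by omega

-- length of the strictly increasing run ending at index i
def incLeft (ratings : List Int) (i : Nat) : Nat := incLeftGo ratings i 0

-- while-loop of _dec_right: k counts the strictly decreasing steps right of index i
def decRightGo (ratings : List Int) (i k : Nat) : Nat :=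
  if h : i + k + 1 < ratings.length ∧
      PySem.List.pyGetD ratings ((i : Int) + (k : Int)) 0
        > PySem.List.pyGetD ratings ((i : Int) + (k : Int) + 1) 0 then
    decRightGo ratings i (k + 1)
  else k
termination_by ratings.length - (i + k)
decreasing_by omega

-- length of the strictly decreasing run starting at index i
def decRight (ratings : List Int) (i : Nat) : Nat := decRightGo ratings i 0

def countCandies_alt (ratings : List Int) : Int :=
  ((List.range ratings.length).map
    (fun i => 1 + ((max (incLeft ratings i) (decRight ratings i) : Nat) : Int))).sum

-- ===== PRECONDITION & SPEC =====
def Spec_countCandies (ratings : List Int) (out : Int) : Prop := out = countCandies_alt ratings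
instance (ratings : List Int) (out : Int) : Decidable (Spec_countCandies ratings out) := by unfold Spec_countCandies; infer_instance

-- ===== CLAIM (what is proved, stated in full; the proofs are below) =====
def Claim_equal_countCandies : Prop := ∀ (ratings : List Int), Dom_countCandies ratings → Spec_countCandies ratings (countCandies ratings)

-- ===== LEMMAS AND PROOFS =====

-- final value of child k according to B
def pvF (r : List Int) (k : Nat) : Int := 1 + ((max (incLeft r k) (decRight r k) : Nat) : Int)

theorem pv_getD_set (xs : List Int) (m k : Nat) (v : Int) (hk : k < xs.length) :
    (xs.set m v).getD k 0 = if k = m then v else xs.getD k 0 := by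
  rcases eq_or_ne k m with rfl | hne
  · simp [List.getD, hk]
  · simp [List.getD, List.getElem?_set_ne (Ne.symm hne), hne]

-- shifting the while-loop counter: one completed increasing step left of i
theorem pv_incGo_shift (r : List Int) (i k : Nat) (hi : 1 ≤ i) :
    incLeftGo r i (k + 1) = 1 + incLeftGo r (i - 1) k := by
  induction hd : i - (k + 1) using Nat.strong_induction_on generalizing k with
  | _ d ih =>
    rw [incLeftGo]
    conv_rhs => rw [incLeftGo]
    have hc1 : ((i : Int) - ((k : Nat) + 1 : Nat) - 1) = (((i - 1 : Nat) : Int) - (k : Int) - 1) := by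
      omega
    have hc2 : ((i : Int) - ((k : Nat) + 1 : Nat)) = (((i - 1 : Nat) : Int) - (k : Int)) := by
      omega
    rw [hc1, hc2]
    by_cases hcond : k + 1 ≤ i - 1 ∧
        PySem.List.pyGetD r (((i - 1 : Nat) : Int) - (k : Int) - 1) 0
          < PySem.List.pyGetD r (((i - 1 : Nat) : Int) - (k : Int)) 0
    · rw [dif_pos ⟨by omega, hcond.2⟩, dif_pos hcond]
      exact ih (i - (k + 2)) (by omega) (k + 1) rfl
    · rw [dif_neg (fun hh => hcond ⟨by omega, hh.2⟩), dif_neg hcond]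
      omega

-- unfolding equations of incLeft in recursive form
theorem pv_incLeft_zero (r : List Int) : incLeft r 0 = 0 := by
  unfold incLeft
  rw [incLeftGo, dif_neg (by omega)]

theorem pv_incLeft_succ (r : List Int) (j : Nat) :
    incLeft r (j + 1)
      = if PySem.List.pyGetD r (j : Int) 0 < PySem.List.pyGetD r ((j : Int) + 1) 0 then
          1 + incLeft r j
        else 0 := by
  unfold incLeft
  rw [incLeftGo]
  have hc1 : (((j + 1 : Nat) : Int) - ((0 : Nat) : Int) - 1) = (j : Int) := by omega
  have hc2 : (((j + 1 : Nat) : Int) - ((0 : Nat) : Int)) = (j : Int) + 1 := by omega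
  rw [hc1, hc2]
  by_cases hcond : PySem.List.pyGetD r (j : Int) 0 < PySem.List.pyGetD r ((j : Int) + 1) 0
  · rw [dif_pos ⟨by omega, hcond⟩, if_pos hcond, pv_incGo_shift r (j + 1) 0 (by omega)]
    simp
  · rw [dif_neg (fun hh => hcond hh.2), if_neg hcond]

-- shifting the while-loop counter: one completed decreasing step right of i
theorem pv_decGo_shift (r : List Int) (i k : Nat) :
    decRightGo r i (k + 1) = 1 + decRightGo r (i + 1) k := by
  induction hd : r.length - (i + k + 1) using Nat.strong_induction_on generalizing k with
  | _ d ih =>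
    rw [decRightGo]
    conv_rhs => rw [decRightGo]
    have hc1 : ((i : Int) + ((k : Nat) + 1 : Nat)) = (((i + 1 : Nat) : Int) + (k : Int)) := by
      omega
    rw [hc1]
    by_cases hcond : (i + 1) + k + 1 < r.length ∧
        PySem.List.pyGetD r (((i + 1 : Nat) : Int) + (k : Int)) 0
          > PySem.List.pyGetD r (((i + 1 : Nat) : Int) + (k : Int) + 1) 0
    · rw [dif_pos ⟨by omega, hcond.2⟩, dif_pos hcond]
      exact ih (r.length - (i + k + 2)) (by omega) (k + 1) rfl
    · rw [dif_neg (fun hh => hcond ⟨by omega, hh.2⟩), dif_neg hcond]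
      omega

-- unfolding equation of decRight in recursive form
theorem pv_decRight_eq (r : List Int) (i : Nat) :
    decRight r i
      = if i + 1 < r.length ∧
          PySem.List.pyGetD r (i : Int) 0 > PySem.List.pyGetD r ((i : Int) + 1) 0 then
          1 + decRight r (i + 1)
        else 0 := by
  unfold decRight
  rw [decRightGo]
  have hc1 : ((i : Int) + ((0 : Nat) : Int)) = (i : Int) := by omega
  rw [hc1]
  by_cases hcond : i + 1 < r.length ∧
      PySem.List.pyGetD r (i : Int) 0 > PySem.List.pyGetD r ((i : Int) + 1) 0
  · rw [dif_pos ⟨by omega, hcond.2⟩, if_pos hcond, pv_decGo_shift r i 0]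
  · rw [dif_neg (fun hh => hcond ⟨by omega, hh.2⟩), if_neg hcond]

-- forward pass: after processing range(1, m), entry k holds 1 + incLeft for k < m, else still 1
theorem pv_fwd (r : List Int) (m : Nat) (hm : m ≤ r.length) :
    ((PySem.List.pyRange 1 (m : Int) 1).foldl (pvFwdStep r) (List.replicate r.length 1)).length
        = r.length ∧
    ∀ k, k < r.length →
      ((PySem.List.pyRange 1 (m : Int) 1).foldl (pvFwdStep r) (List.replicate r.length 1)).getD k 0
        = if k < m then 1 + (incLeft r k : Int) else 1 := by
  induction m with
  | zero =>
    rw [PySem.List.pyRange_one_eq_nil (by omega)]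
    refine ⟨by simp, fun k hk => ?_⟩
    simp [List.getD, hk]
  | succ m ih =>
    rcases Nat.eq_zero_or_pos m with rfl | hpos
    · rw [PySem.List.pyRange_one_eq_nil (by omega)]
      simp only [List.foldl_nil]
      refine ⟨by simp, fun k hk => ?_⟩
      have hrep : (List.replicate r.length (1:Int)).getD k 0 = 1 := by simp [List.getD, hk]
      rw [hrep]
      split_ifs with h
      · have hk0 : k = 0 := by omega
        subst hk0
        simp [pv_incLeft_zero]
      · rfl
    · obtain ⟨hlen, hval⟩ := ih (by omega)
      have hsplit : PySem.List.pyRange 1 ((m : Int) + 1) 1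
          = PySem.List.pyRange 1 (m : Int) 1 ++ [(m : Int)] :=
        PySem.List.pyRange_one_succ_right (by omega)
      have hcast : ((m + 1 : Nat) : Int) = (m : Int) + 1 := by push_cast; ring
      rw [hcast, hsplit, List.foldl_append]
      simp only [List.foldl_cons, List.foldl_nil]
      set c := (PySem.List.pyRange 1 (m : Int) 1).foldl (pvFwdStep r) (List.replicate r.length 1)
      have hm1 : ((m : Int) - 1) = ((m - 1 : Nat) : Int) := by omega
      have hidx : (((m - 1 : Nat) : Int) + 1) = (m : Int) := by omega
      have hLm : incLeft r m
          = if PySem.List.pyGetD r ((m - 1 : Nat) : Int) 0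
              < PySem.List.pyGetD r (((m - 1 : Nat) : Int) + 1) 0 then
              1 + incLeft r (m - 1) else 0 := by
        conv_lhs => rw [show m = (m - 1) + 1 by omega]
        rw [pv_incLeft_succ]
      rw [hidx] at hLm
      unfold pvFwdStep
      rw [hm1]
      split_ifs with hcond
      · -- ratings[m] > ratings[m-1]
        simp only [PySem.List.pySetD_natCast, PySem.List.pyGetD_natCast]
        refine ⟨by simp [hlen], fun k hk => ?_⟩
        rw [pv_getD_set c m k _ (by omega)]
        split_ifs with hkm hklt hklt
        · subst hkm
          rw [hval (k - 1) (by omega), if_pos (by omega)]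
          have hL : incLeft r k = 1 + incLeft r (k - 1) := by
            rw [hLm, if_pos hcond]
          rw [hL]
          push_cast
          ring
        · omega
        · rw [hval k hk, if_pos (by omega)]
        · rw [hval k hk, if_neg (by omega)]
      · refine ⟨hlen, fun k hk => ?_⟩
        rw [hval k hk]
        split_ifs with hklt hklt'
        · rfl
        · omega
        · -- k = m and ratings[m] ≤ ratings[m-1] ⇒ incLeft r m = 0
          have hkm : k = m := by omega
          subst hkm
          rw [hLm, if_neg (fun hlt => hcond hlt)]
          simp
        · rfl

-- one backward step at index i (i + 2 ≤ n): makes entry i final, keeps the rest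
theorem pv_bstep (r : List Int) (i : Nat) (c : List Int) (hlen : c.length = r.length)
    (hi : i + 2 ≤ r.length)
    (hc : ∀ k, k < r.length →
      c.getD k 0 = if i < k then pvF r k else 1 + (incLeft r k : Int)) :
    (pvBwdStep r c (i : Int)).length = r.length ∧
    ∀ k, k < r.length →
      (pvBwdStep r c (i : Int)).getD k 0
        = if i ≤ k then pvF r k else 1 + (incLeft r k : Int) := by
  unfold pvBwdStep
  have hcast2 : ((i : Int) + 1) = ((i + 1 : Nat) : Int) := by push_cast; ring
  have hR : decRight r i
      = if i + 1 < r.length ∧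
          PySem.List.pyGetD r (i : Int) 0 > PySem.List.pyGetD r ((i : Int) + 1) 0
        then 1 + decRight r (i + 1) else 0 := pv_decRight_eq r i
  rw [hcast2] at hR
  rw [hcast2]
  split_ifs with hcond
  · -- ratings[i] > ratings[i+1]
    simp only [PySem.List.pySetD_natCast, PySem.List.pyGetD_natCast]
    refine ⟨by simp [hlen], fun k hk => ?_⟩
    rw [pv_getD_set c i k _ (by omega)]
    have hci : c.getD i 0 = 1 + (incLeft r i : Int) := by
      rw [hc i (by omega), if_neg (by omega)]
    have hci1 : c.getD (i + 1) 0 = pvF r (i + 1) := by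
      rw [hc (i + 1) (by omega), if_pos (by omega)]
    have hLi1 : incLeft r (i + 1) = 0 := by
      rw [pv_incLeft_succ, if_neg ?_]
      rw [hcast2]
      exact fun hlt => absurd hcond (not_lt.mpr hlt.le)
    have hRi : decRight r i = 1 + decRight r (i + 1) := by
      rw [hR, if_pos ⟨by omega, hcond⟩]
    split_ifs with hki hkle hkle
    · subst hki
      rw [hci, hci1]
      unfold pvF
      rw [hLi1, hRi]
      push_cast
      omega
    · omega
    · rw [hc k hk, if_pos (by omega)]
    · rw [hc k hk, if_neg (by omega)]
  · refine ⟨hlen, fun k hk => ?_⟩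
    rw [hc k hk]
    split_ifs with hki hkle hkle
    · rfl
    · omega
    · -- k = i, ratings[i] ≤ ratings[i+1] ⇒ decRight r i = 0
      have hki' : k = i := by omega
      subst hki'
      have hRi : decRight r k = 0 := by
        rw [hR, if_neg (fun hh => hcond hh.2)]
      unfold pvF
      rw [hRi]
      simp
    · rfl

-- backward pass: if entries above m are final and the rest hold the forward values,
-- processing range(m, -1, -1) makes every entry final
theorem pv_bwd (r : List Int) (m : Nat) (c : List Int) (hlen : c.length = r.length)
    (hm : m + 2 ≤ r.length)
    (hc : ∀ k, k < r.length →
      c.getD k 0 = if m < k then pvF r k else 1 + (incLeft r k : Int)) :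
    ((PySem.List.pyRange (m : Int) (-1) (-1)).foldl (pvBwdStep r) c).length = r.length ∧
    ∀ k, k < r.length →
      ((PySem.List.pyRange (m : Int) (-1) (-1)).foldl (pvBwdStep r) c).getD k 0 = pvF r k := by
  induction m generalizing c with
  | zero =>
    rw [PySem.List.pyRange_neg_one_cons (by omega)]
    have htail : ((0 : Nat) : Int) - 1 = -1 := by omega
    rw [htail, PySem.List.pyRange_neg_one_eq_nil (by omega)]
    simp only [List.foldl_cons, List.foldl_nil]
    obtain ⟨hl2, hv2⟩ := pv_bstep r 0 c hlen (by omega) hc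
    refine ⟨hl2, fun k hk => ?_⟩
    rw [hv2 k hk, if_pos (by omega)]
  | succ m ih =>
    rw [PySem.List.pyRange_neg_one_cons (by omega)]
    have hcast : ((m + 1 : Nat) : Int) - 1 = (m : Int) := by push_cast; ring
    rw [hcast]
    simp only [List.foldl_cons]
    obtain ⟨hl2, hv2⟩ := pv_bstep r (m + 1) c hlen (by omega) hc
    exact ih (pvBwdStep r c ((m + 1 : Nat) : Int)) hl2 (by omega)
      (fun k hk => by rw [hv2 k hk]; split_ifs with h1 h2 h2 <;> first | rfl | omega)

-- small cases: length 0 and 1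
theorem pv_small (r : List Int) (h : r.length ≤ 1) : countCandies r = countCandies_alt r := by
  match r, h with
  | [], _ =>
    unfold countCandies countCandies_alt
    simp [PySem.List.pyRange_one_eq_nil, PySem.List.pyRange_neg_one_eq_nil]
  | [x], _ =>
    unfold countCandies countCandies_alt
    simp only [PySem.List.len_eq, List.length_singleton, Nat.cast_one]
    rw [PySem.List.pyRange_one_eq_nil (by norm_num), show (1:Int) - 2 = -1 by norm_num,
      PySem.List.pyRange_neg_one_eq_nil (by norm_num)]
    simp only [List.foldl_nil, List.replicate_one, List.sum_singleton,
      List.range_one, List.map_singleton]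
    have hL0 : incLeft [x] 0 = 0 := pv_incLeft_zero [x]
    have hR0 : decRight [x] 0 = 0 := by rw [pv_decRight_eq, if_neg (by omega)]
    rw [hL0, hR0]
    simp

-- ===== VERDICT (by name: the statement is the Claim_ definition above) =====
theorem countCandies_spec : Claim_equal_countCandies := by
  intro r _
  unfold Spec_countCandies
  rcases le_or_gt r.length 1 with hsmall | hbig
  · exact pv_small r hsmall
  · -- length ≥ 2
    unfold countCandies
    simp only [PySem.List.len_eq]
    obtain ⟨hl1, hv1⟩ := pv_fwd r r.length (le_refl _)
    have hcast : ((r.length : Int) - 2) = ((r.length - 2 : Nat) : Int) := by omega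
    rw [hcast]
    obtain ⟨hl2, hv2⟩ := pv_bwd r (r.length - 2)
      ((PySem.List.pyRange 1 (r.length : Int) 1).foldl (pvFwdStep r) (List.replicate r.length 1))
      hl1 (by omega)
      (by
        intro k hk
        rw [hv1 k hk, if_pos hk]
        split_ifs with hkm
        · -- k = length - 1 : decRight is 0 there
          have hk' : k = r.length - 1 := by omega
          subst hk'
          have hRlast : decRight r (r.length - 1) = 0 := by
            rw [pv_decRight_eq, if_neg (by omega)]
          unfold pvF
          rw [hRlast]
          simp
        · rfl)
    set c2 := (PySem.List.pyRange ((r.length - 2 : Nat) : Int) (-1) (-1)).foldl (pvBwdStep r)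
      ((PySem.List.pyRange 1 (r.length : Int) 1).foldl (pvFwdStep r) (List.replicate r.length 1))
    have hc2 : c2 = (List.range r.length).map (pvF r) := by
      apply List.ext_getElem
      · simp [hl2]
      · intro k hk1 hk2
        have hval := hv2 k (by omega)
        rw [List.getD_eq_getElem?_getD, List.getElem?_eq_getElem hk1] at hval
        simpa using hval
    rw [hc2]
    rfl
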